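-- pv_equiv track=rewrite | github.com/KevinH45/USACO-Prep | CODEWARS/adRepeat.py | ascend_descend
-- ===== SOURCE A (Python) =====
-- def ascend_descend(length, minimum, maximum):
--
--     if maximum < minimum or length==0:
--         return ""
--
--     if maximum == minimum:
--         return (str(minimum)*length) [0:length]
--
--     s = str(minimum)
--     c = minimum
--     interval = 1
--
--     while len(s)<length:
--         c += interval
--         s += str(c)
--
--         if c==minimum:
--             interval = 1
--
--         if c==maximum:
--             interval = -1
--
--     return s[0:length]
-- ===== SOURCE B (Python) =====
-- def ascend_descend(length, minimum, maximum):
--     if maximum < minimum or length <= 0: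
--         return ""
--     if maximum == minimum:
--         return (str(minimum) * length)[0:length]
--     top = min(maximum, minimum + length)
--     block = "".join(map(str, range(minimum, top + 1)))
--     if top == maximum:
--         block += "".join(map(str, range(maximum - 1, minimum, -1)))
--     reps = -(-length // len(block))
--     return (block * reps)[0:length]
-- ===== Notes on version B (the rewrite author's own statement) =====
-- stated objective: faster
-- what changed: A grows the string one number at a time with a stateful direction-flipping while-loop of repeated string appends; B precomputes the zigzag period block from two ranges (capped at length+1 values), repeats it ceil(length/len(block)) times and slices to length.
-- intended difference: On negative length with minimum < maximum, A returns str(minimum)[0:length] (leftover loop state), non-empty when len(str(minimum)) > -length, e.g. A(-1,10,12)='1'; B returns '' as intended for a non-positive requested length. — e.g. on ascend_descend(-1, 10, 12): A returns "1", B returns ""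
import Mathlib
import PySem

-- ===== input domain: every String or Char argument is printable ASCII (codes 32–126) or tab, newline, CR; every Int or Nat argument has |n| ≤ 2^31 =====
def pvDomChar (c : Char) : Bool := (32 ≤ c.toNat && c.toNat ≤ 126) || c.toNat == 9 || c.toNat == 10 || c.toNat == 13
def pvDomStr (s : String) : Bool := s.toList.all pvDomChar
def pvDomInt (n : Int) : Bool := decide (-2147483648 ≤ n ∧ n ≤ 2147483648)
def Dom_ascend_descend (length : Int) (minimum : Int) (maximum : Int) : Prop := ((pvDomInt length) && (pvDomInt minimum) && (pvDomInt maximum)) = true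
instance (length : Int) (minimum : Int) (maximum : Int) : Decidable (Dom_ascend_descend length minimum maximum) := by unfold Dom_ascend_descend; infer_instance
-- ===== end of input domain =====

-- B replaces A's stateful interval-flipping append loop by building the zigzag period block from
-- two ranges (capped at length+1 values), repeating it and slicing (measured faster at scale).

-- ===== PORT A =====
-- A's while-loop with state (s, c, interval); each iteration appends at least one character,
-- so length.toNat iterations of fuel always reach the loop's exit condition
def ascendLoop (length : Int) (mn : Int) (mx : Int) : Nat → List Char → Int → Int → List Char
  | 0, s, _, _ => s
  | fuel+1, s, c, i =>
    if (s.length : Int) < length then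
      let c' := c + i
      let s' := s ++ PySem.Int.toChars c'
      let i1 := if c' = mn then (1 : Int) else i
      let i2 := if c' = mx then (-1 : Int) else i1
      ascendLoop length mn mx fuel s' c' i2
    else s

def ascend_descend (length : Int) (minimum : Int) (maximum : Int) : String :=
  if maximum < minimum ∨ length = 0 then "" else
  if maximum = minimum then
    String.ofList (PySem.List.slice (PySem.List.pyRepeat (PySem.Int.toChars minimum) length) (some 0) (some length))
  else
    String.ofList (PySem.List.slice (ascendLoop length minimum maximum length.toNat (PySem.Int.toChars minimum) minimum 1) (some 0) (some length))

-- ===== PORT B =====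
def ascend_descend_alt (length : Int) (minimum : Int) (maximum : Int) : String :=
  if maximum < minimum ∨ length ≤ 0 then "" else
  if maximum = minimum then
    String.ofList (PySem.List.slice (PySem.List.pyRepeat (PySem.Int.toChars minimum) length) (some 0) (some length))
  else
    let top := min maximum (minimum + length)
    let asc := ((PySem.List.pyRange minimum (top+1) 1).map PySem.Int.toChars).flatten
    let block := if top = maximum then
        asc ++ ((PySem.List.pyRange (maximum-1) minimum (-1)).map PySem.Int.toChars).flatten
      else asc
    let reps := -(PySem.Int.floordiv (-length) (block.length : Int))
    String.ofList (PySem.List.slice (PySem.List.pyRepeat block reps) (some 0) (some length))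

-- ===== PRECONDITION & SPEC =====
-- On negative length with minimum < maximum, A returns str(minimum)[0:length] — leftover loop
-- state of its implementation — which is non-empty when len(str(minimum)) > -length; B returns
-- the intended "" for a non-positive requested length.
def D_ascend_descend (length : Int) (minimum : Int) (maximum : Int) : Prop :=
  length < 0 ∧ minimum < maximum ∧ 0 < length + ((PySem.Int.toChars minimum).length : Int)
instance (length : Int) (minimum : Int) (maximum : Int) : Decidable (D_ascend_descend length minimum maximum) := by unfold D_ascend_descend; infer_instance

def Spec_ascend_descend (length : Int) (minimum : Int) (maximum : Int) (out : String) : Prop :=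
  ¬ D_ascend_descend length minimum maximum → out = ascend_descend_alt length minimum maximum
instance (length : Int) (minimum : Int) (maximum : Int) (out : String) : Decidable (Spec_ascend_descend length minimum maximum out) := by unfold Spec_ascend_descend; infer_instance

def pvDiffWitness_ascend_descend : Int × Int × Int := (-1, 10, 12)
def pvDiffWitnessOut_ascend_descend : String × String := ("1", "")

-- ===== CLAIM =====
def Claim_unchanged_ascend_descend : Prop := ∀ (length : Int) (minimum : Int) (maximum : Int), Dom_ascend_descend length minimum maximum → Spec_ascend_descend length minimum maximum (ascend_descend length minimum maximum)
def Claim_changed_ascend_descend : Prop := Dom_ascend_descend (pvDiffWitness_ascend_descend.1) (pvDiffWitness_ascend_descend.2.1) (pvDiffWitness_ascend_descend.2.2) ∧ D_ascend_descend (pvDiffWitness_ascend_descend.1) (pvDiffWitness_ascend_descend.2.1) (pvDiffWitness_ascend_descend.2.2) ∧ ascend_descend (pvDiffWitness_ascend_descend.1) (pvDiffWitness_ascend_descend.2.1) (pvDiffWitness_ascend_descend.2.2) = pvDiffWitnessOut_ascend_descend.1 ∧ ascend_descend_alt (pvDiffWitness_ascend_descend.1) (pvDiffWitness_ascend_descend.2.1)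 (pvDiffWitness_ascend_descend.2.2) = pvDiffWitnessOut_ascend_descend.2 ∧ pvDiffWitnessOut_ascend_descend.1 ≠ pvDiffWitnessOut_ascend_descend.2
def Claim_exact_ascend_descend : Prop := ∀ (length : Int) (minimum : Int) (maximum : Int), Dom_ascend_descend length minimum maximum → D_ascend_descend length minimum maximum → ascend_descend length minimum maximum ≠ ascend_descend_alt length minimum maximum

-- ===== LEMMAS AND PROOFS =====

-- the stream of characters A's loop appends in n iterations from state (c, i)
def adGen (mn : Int) (mx : Int) : Nat → Int → Int → List Char
  | 0, _, _ => []
  | n+1, c, i =>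
    let c' := c + i
    let i1 := if c' = mn then (1 : Int) else i
    let i2 := if c' = mx then (-1 : Int) else i1
    PySem.Int.toChars c' ++ adGen mn mx n c' i2

-- the loop state (c, interval) after n iterations from (c, i)
def adState (mn : Int) (mx : Int) : Nat → Int → Int → Int × Int
  | 0, c, i => (c, i)
  | n+1, c, i =>
    let c' := c + i
    let i1 := if c' = mn then (1 : Int) else i
    let i2 := if c' = mx then (-1 : Int) else i1
    adState mn mx n c' i2

theorem adGen_succ (mn mx : Int) (n : Nat) (c i : Int) :
    adGen mn mx (n+1) c i
      = PySem.Int.toChars (c+i)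
        ++ adGen mn mx n (c+i) (if c+i = mx then (-1:Int) else if c+i = mn then (1:Int) else i) := rfl

theorem adState_succ (mn mx : Int) (n : Nat) (c i : Int) :
    adState mn mx (n+1) c i
      = adState mn mx n (c+i) (if c+i = mx then (-1:Int) else if c+i = mn then (1:Int) else i) := rfl

theorem toDigitsCore_len_ge (b : Nat) : ∀ (f n : Nat) (ds : List Char),
    ds.length ≤ (Nat.toDigitsCore b f n ds).length := by
  intro f
  induction f with
  | zero => intro n ds; simp [Nat.toDigitsCore]
  | succ f ih =>
    intro n ds
    simp only [Nat.toDigitsCore]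
    split
    · simp
    · exact le_trans (by simp) (ih _ _)

theorem toDigits_len_pos (b n : Nat) : 0 < (Nat.toDigits b n).length := by
  unfold Nat.toDigits
  simp only [Nat.toDigitsCore]
  split
  · simp
  · exact lt_of_lt_of_le (by simp) (toDigitsCore_len_ge b n (n / b) _)

theorem toChars_len_pos (n : Int) : 0 < (PySem.Int.toChars n).length := by
  unfold PySem.Int.toChars
  split
  · simp
  · exact toDigits_len_pos 10 n.toNat

theorem adGen_len (mn mx : Int) : ∀ (n : Nat) (c i : Int), n ≤ (adGen mn mx n c i).length := by
  intro n
  induction n with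
  | zero => intro c i; simp [adGen]
  | succ n ih =>
    intro c i
    simp only [adGen, List.length_append]
    have h1 := toChars_len_pos (c + i)
    have h2 := ih (c + i) (if c + i = mx then (-1 : Int) else if c + i = mn then (1 : Int) else i)
    omega

theorem take_app_of_le {α : Type} (N : Nat) (x t : List α) (h : N ≤ x.length) :
    (x ++ t).take N = x.take N := by
  induction x generalizing N with
  | nil => simp at h; simp [h]
  | cons a s ih =>
    cases N with
    | zero => simp
    | succ N => simp only [List.cons_append, List.take_succ_cons]; rw [ih N (by simpa using h)]

theorem ascendLoop_take (length mn mx : Int) :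
    ∀ (fuel : Nat) (s : List Char) (c i : Int), length ≤ (s.length : Int) + (fuel : Int) →
      (ascendLoop length mn mx fuel s c i).take length.toNat
        = (s ++ adGen mn mx fuel c i).take length.toNat := by
  intro fuel
  induction fuel with
  | zero => intro s c i h; simp [ascendLoop, adGen]
  | succ fuel ih =>
    intro s c i h
    by_cases hc : (s.length : Int) < length
    · simp only [ascendLoop, adGen, if_pos hc]
      rw [ih]
      · simp [List.append_assoc]
      · have := toChars_len_pos (c + i)
        simp only [List.length_append]
        push_cast at h ⊢
        omega
    · simp only [ascendLoop, if_neg hc]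
      have hN : length.toNat ≤ s.length := by omega
      rw [take_app_of_le _ _ _ hN]

theorem adState_add (mn mx : Int) : ∀ (a b : Nat) (c i : Int),
    adState mn mx (a + b) c i
      = adState mn mx b (adState mn mx a c i).1 (adState mn mx a c i).2 := by
  intro a
  induction a with
  | zero => intro b c i; simp [adState]
  | succ a ih =>
    intro b c i
    have hrw : a + 1 + b = (a + b) + 1 := by omega
    rw [hrw]
    simp only [adState]
    exact ih b _ _

theorem adGen_add (mn mx : Int) : ∀ (a b : Nat) (c i : Int),
    adGen mn mx (a + b) c i
      = adGen mn mx a c i ++ adGen mn mx b (adState mn mx a c i).1 (adState mn mx a c i).2 := by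
  intro a
  induction a with
  | zero => intro b c i; simp [adGen, adState]
  | succ a ih =>
    intro b c i
    have hrw : a + 1 + b = (a + b) + 1 := by omega
    rw [hrw]
    simp only [adGen, adState]
    rw [ih, List.append_assoc]

-- ascending phase: from (c, 1) with room to climb, the loop emits str(c+1) … str(c+n)
theorem adGen_asc (mn mx : Int) (hlt : mn < mx) : ∀ (n : Nat) (c : Int), mn ≤ c → c + n ≤ mx →
    adGen mn mx n c 1 = ((PySem.List.pyRange (c+1) (c+1+n) 1).map PySem.Int.toChars).flatten
    ∧ (c + n = mx → 1 ≤ n → adState mn mx n c 1 = (mx, -1))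
    ∧ (c + n < mx → adState mn mx n c 1 = (c + n, 1)) := by
  intro n
  induction n with
  | zero =>
    intro c h1 h2
    refine ⟨by simp [adGen, PySem.List.pyRange_one_eq_nil (le_refl (c+1))], ?_, ?_⟩
    · intro h hn; exact absurd hn (by omega)
    · intro _; simp [adState]
  | succ n ih =>
    intro c h1 h2
    push_cast at h2
    have hmn : ¬ (c + 1 = mn) := by omega
    by_cases hmx : c + 1 = mx
    · have hn : n = 0 := by omega
      subst hn
      have hi : (if c + 1 = mx then (-1:Int) else if c + 1 = mn then (1:Int) else 1) = -1 := by
        rw [if_pos hmx]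
      refine ⟨?_, ?_, ?_⟩
      · rw [adGen_succ, hi]
        push_cast
        rw [PySem.List.pyRange_one_cons (a := c+1) (b := c+1+1) (by omega),
            PySem.List.pyRange_one_eq_nil (by omega)]
        simp [adGen]
      · intro _ _
        rw [adState_succ, hi, hmx]
        simp [adState]
      · intro hlt2; push_cast at hlt2; omega
    · have ihh := ih (c + 1) (by omega) (by push_cast; omega)
      have hi : (if c + 1 = mx then (-1:Int) else if c + 1 = mn then (1:Int) else 1) = 1 := by
        rw [if_neg hmx, if_neg hmn]
      refine ⟨?_, ?_, ?_⟩
      · rw [adGen_succ, hi, ihh.1]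
        push_cast
        rw [show c + 1 + ((n:Int) + 1) = c + 1 + 1 + (n:Int) from by ring]
        rw [PySem.List.pyRange_one_cons (a := c+1) (b := c+1+1+(n:Int)) (by omega)]
        simp
      · intro hEq hn1
        push_cast at hEq
        have hn2 : 1 ≤ n := by omega
        rw [adState_succ, hi]
        exact ihh.2.1 (by omega) hn2
      · intro hlt2
        push_cast at hlt2
        rw [adState_succ, hi, ihh.2.2 (by omega)]
        push_cast
        simp only [Prod.mk.injEq]
        exact ⟨by omega, trivial⟩

-- descending phase: from (c, -1), the loop emits str(c-1) … str(mn) and flips back to (mn, 1)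
theorem adGen_desc (mn mx : Int) (hlt : mn < mx) : ∀ (n : Nat) (c : Int), c ≤ mx → mn < c → c - n = mn →
    adGen mn mx n c (-1) = ((PySem.List.pyRange (c-1) (mn-1) (-1)).map PySem.Int.toChars).flatten
    ∧ adState mn mx n c (-1) = (mn, 1) := by
  intro n
  induction n with
  | zero => intro c h1 h2 h3; push_cast at h3; omega
  | succ n ih =>
    intro c h1 h2 h3
    push_cast at h3
    have hmx : ¬ (c + -1 = mx) := by omega
    have hc1 : c + -1 = c - 1 := by ring
    rcases Nat.eq_zero_or_pos n with h0 | h0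
    · subst h0
      have hmn : c + -1 = mn := by omega
      have hi : (if c + -1 = mx then (-1:Int) else if c + -1 = mn then (1:Int) else -1) = 1 := by
        rw [if_neg hmx, if_pos hmn]
      constructor
      · rw [adGen_succ, hi, hmn]
        rw [show c - 1 = mn from by omega]
        rw [PySem.List.pyRange_neg_one_cons (a := mn) (b := mn-1) (by omega),
            PySem.List.pyRange_neg_one_eq_nil (a := mn-1) (b := mn-1) (le_refl _)]
        simp [adGen]
      · rw [adState_succ, hi, hmn]
        simp [adState]
    · have hmn : ¬ (c + -1 = mn) := by omega
      have ihh := ih (c-1) (by omega) (by omega) (by push_cast; omega)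
      have hi : (if c + -1 = mx then (-1:Int) else if c + -1 = mn then (1:Int) else -1) = -1 := by
        rw [if_neg hmx, if_neg hmn]
      constructor
      · rw [adGen_succ, hi, hc1, ihh.1]
        rw [PySem.List.pyRange_neg_one_cons (a := c-1) (b := mn-1) (by omega)]
        simp
      · rw [adState_succ, hi, hc1, ihh.2]

-- the characters of one full period, starting after the initial str(minimum)
def adPchars (mn mx : Int) : List Char :=
  ((PySem.List.pyRange (mn+1) (mx+1) 1).map PySem.Int.toChars).flatten
    ++ ((PySem.List.pyRange (mx-1) (mn-1) (-1)).map PySem.Int.toChars).flatten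

-- the period block B builds (ascending then descending part)
def adBchars (mn mx : Int) : List Char :=
  ((PySem.List.pyRange mn (mx+1) 1).map PySem.Int.toChars).flatten
    ++ ((PySem.List.pyRange (mx-1) mn (-1)).map PySem.Int.toChars).flatten

theorem adGen_period (mn mx : Int) (hlt : mn < mx) :
    adGen mn mx ((mx - mn).toNat + (mx - mn).toNat) mn 1 = adPchars mn mx
    ∧ adState mn mx ((mx - mn).toNat + (mx - mn).toNat) mn 1 = (mn, 1) := by
  have hm : ((mx - mn).toNat : Int) = mx - mn := by omega
  have hasc := adGen_asc mn mx hlt (mx - mn).toNat mn (le_refl mn) (by omega)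
  have hst : adState mn mx (mx - mn).toNat mn 1 = (mx, -1) :=
    hasc.2.1 (by omega) (by omega)
  have hdesc := adGen_desc mn mx hlt (mx - mn).toNat mx (le_refl mx) hlt (by omega)
  constructor
  · rw [adGen_add, hst, hdesc.1, hasc.1]
    unfold adPchars
    have harg : mn + 1 + ((mx - mn).toNat : Int) = mx + 1 := by omega
    rw [harg]
  · rw [adState_add, hst, hdesc.2]

theorem adGen_pow (mn mx : Int) (hlt : mn < mx) : ∀ (k : Nat),
    adGen mn mx (((mx - mn).toNat + (mx - mn).toNat) * k) mn 1
      = (List.replicate k (adPchars mn mx)).flatten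
    ∧ adState mn mx (((mx - mn).toNat + (mx - mn).toNat) * k) mn 1 = (mn, 1) := by
  intro k
  induction k with
  | zero => simp [adGen, adState]
  | succ k ih =>
    have hsplit : ((mx - mn).toNat + (mx - mn).toNat) * (k + 1)
        = ((mx - mn).toNat + (mx - mn).toNat) + ((mx - mn).toNat + (mx - mn).toNat) * k := by ring
    rw [hsplit]
    have hp := adGen_period mn mx hlt
    constructor
    · rw [adGen_add, hp.1, hp.2, ih.1, List.replicate_succ, List.flatten_cons]
    · rw [adState_add, hp.2, ih.2]

-- the descending range with stop mn-1 is the one with stop mn followed by mn itself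
theorem desc_range_split (mn mx : Int) (hlt : mn < mx) :
    PySem.List.pyRange (mx-1) (mn-1) (-1) = PySem.List.pyRange (mx-1) mn (-1) ++ [mn] := by
  rw [PySem.List.pyRange_neg_one_eq_reverse (mx-1) (mn-1), PySem.List.pyRange_neg_one_eq_reverse (mx-1) mn]
  have h1 : mn - 1 + 1 = mn := by omega
  have h2 : mx - 1 + 1 = mx := by omega
  rw [h1, h2]
  rw [PySem.List.pyRange_one_cons (a := mn) (b := mx) hlt]
  simp

-- rotating the period: str(min) ++ P = B-block ++ str(min)
theorem adRot_one (mn mx : Int) (hlt : mn < mx) :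
    PySem.Int.toChars mn ++ adPchars mn mx = adBchars mn mx ++ PySem.Int.toChars mn := by
  unfold adPchars adBchars
  rw [desc_range_split mn mx hlt]
  rw [PySem.List.pyRange_one_cons (a := mn) (b := mx+1) (by omega)]
  simp [List.append_assoc]

theorem adRot (mn mx : Int) (hlt : mn < mx) : ∀ (k : Nat),
    PySem.Int.toChars mn ++ (List.replicate k (adPchars mn mx)).flatten
      = (List.replicate k (adBchars mn mx)).flatten ++ PySem.Int.toChars mn := by
  intro k
  induction k with
  | zero => simp
  | succ k ih =>
    rw [List.replicate_succ, List.flatten_cons, List.replicate_succ, List.flatten_cons]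
    rw [← List.append_assoc, adRot_one mn mx hlt, List.append_assoc, ih, ← List.append_assoc]

theorem flat_replicate_len {α : Type} (bs : List α) : ∀ (r : Nat),
    ((List.replicate r bs).flatten).length = r * bs.length := by
  intro r
  induction r with
  | zero => simp
  | succ r ih => rw [List.replicate_succ, List.flatten_cons, List.length_append, ih]; ring

theorem take_flat_replicate {α : Type} (bs : List α) (N : Nat) :
    ∀ (r k : Nat), r ≤ k → N ≤ r * bs.length →
      ((List.replicate k bs).flatten).take N = ((List.replicate r bs).flatten).take N := by
  intro r k hrk hN
  have hsplit : k = r + (k - r) := by omega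
  rw [hsplit, List.replicate_add, List.flatten_append]
  exact take_app_of_le N _ _ (by rw [flat_replicate_len]; omega)

theorem flatten_map_len_ge (l : List Int) :
    l.length ≤ ((l.map PySem.Int.toChars).flatten).length := by
  induction l with
  | nil => simp
  | cons a t ih =>
    simp only [List.map_cons, List.flatten_cons, List.length_append, List.length_cons]
    have := toChars_len_pos a
    omega

-- A's result, as a take of the generated stream
theorem a_chars (length mn mx : Int) (hlen : 0 < length) (hlt : mn < mx) :
    ascend_descend length mn mx
      = String.ofList ((PySem.Int.toChars mn ++ adGen mn mx length.toNat mn 1).take length.toNat) := by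
  unfold ascend_descend
  rw [if_neg (by omega), if_neg (by omega)]
  rw [PySem.List.slice_zero_start, PySem.List.slice_to _ (by omega)]
  rw [ascendLoop_take length mn mx length.toNat (PySem.Int.toChars mn) mn 1 (by push_cast; omega)]

-- the common take-equality through the rotated periodic stream
theorem take_stream_eq (length mn mx : Int) (hlen : 0 < length) (hlt : mn < mx)
    (r : Nat) (hr1 : 1 ≤ r) (hrlen : length.toNat ≤ r * (adBchars mn mx).length) :
    (PySem.Int.toChars mn ++ adGen mn mx length.toNat mn 1).take length.toNat
      = ((List.replicate r (adBchars mn mx)).flatten).take length.toNat := by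
  set N := length.toNat with hN
  set m := (mx - mn).toNat with hm
  have hm1 : 1 ≤ m := by omega
  set k := r + N with hk
  have hNk : N ≤ (m + m) * k := by
    calc N ≤ 2 * k := by omega
    _ ≤ (m + m) * k := Nat.mul_le_mul_right k (by omega)
  have hlen1 : N ≤ (PySem.Int.toChars mn ++ adGen mn mx N mn 1).length := by
    simp only [List.length_append]
    have := adGen_len mn mx N mn 1
    omega
  have hsplit : (m + m) * k = N + ((m + m) * k - N) := by omega
  have step1 : (PySem.Int.toChars mn ++ adGen mn mx N mn 1).take N
      = (PySem.Int.toChars mn ++ adGen mn mx ((m+m)*k) mn 1).take N := by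
    conv_rhs => rw [hsplit, adGen_add, ← List.append_assoc]
    rw [take_app_of_le N _ _ hlen1]
  have step2 : PySem.Int.toChars mn ++ adGen mn mx ((m+m)*k) mn 1
      = (List.replicate k (adBchars mn mx)).flatten ++ PySem.Int.toChars mn := by
    rw [(adGen_pow mn mx hlt k).1, adRot mn mx hlt]
  have hkb : N ≤ k * (adBchars mn mx).length := by
    have := Nat.mul_le_mul_right (adBchars mn mx).length (show r ≤ k by omega)
    omega
  calc (PySem.Int.toChars mn ++ adGen mn mx N mn 1).take N
      = (PySem.Int.toChars mn ++ adGen mn mx ((m+m)*k) mn 1).take N := step1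
    _ = ((List.replicate k (adBchars mn mx)).flatten ++ PySem.Int.toChars mn).take N := by
        rw [step2]
    _ = ((List.replicate k (adBchars mn mx)).flatten).take N :=
        take_app_of_le N _ _ (by rw [flat_replicate_len]; omega)
    _ = ((List.replicate r (adBchars mn mx)).flatten).take N :=
        take_flat_replicate _ N r k (by omega) hrlen

theorem reps_spec (length L : Int) (hlen : 0 < length) (hL : 0 < L) :
    1 ≤ -(PySem.Int.floordiv (-length) L) ∧ length ≤ -(PySem.Int.floordiv (-length) L) * L := by
  set q := PySem.Int.floordiv (-length) L with hq
  have h1 : q * L ≤ -length :=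
    (PySem.Int.le_floordiv_iff_mul_le (a := -length) (b := L) (q := q) hL).mp le_rfl
  have h2 : q < 0 :=
    (PySem.Int.floordiv_lt_iff_lt_mul (a := -length) (b := L) (q := 0) hL).mpr (by omega)
  constructor
  · omega
  · have h3 : length ≤ -(q * L) := by linarith
    calc length ≤ -(q * L) := h3
      _ = -q * L := by ring

-- the main-branch equality for positive length
theorem main_eq (length mn mx : Int) (hlen : 0 < length) (hlt : mn < mx) :
    ascend_descend length mn mx = ascend_descend_alt length mn mx := by
  rw [a_chars length mn mx hlen hlt]
  simp only [ascend_descend_alt]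
  rw [if_neg (by omega), if_neg (by omega)]
  by_cases htop : mx ≤ mn + length
  · -- full period available: top = maximum
    have hmin : min mx (mn + length) = mx := min_eq_left htop
    rw [hmin, if_pos rfl]
    rw [show ((PySem.List.pyRange mn (mx+1) 1).map PySem.Int.toChars).flatten
        ++ ((PySem.List.pyRange (mx-1) mn (-1)).map PySem.Int.toChars).flatten
        = adBchars mn mx from rfl]
    set L := (adBchars mn mx).length with hLdef
    have hLpos : 0 < L := by
      have h := toChars_len_pos mn
      rw [hLdef]
      unfold adBchars
      rw [PySem.List.pyRange_one_cons (a := mn) (b := mx+1) (by omega)]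
      simp only [List.map_cons, List.flatten_cons, List.length_append]
      omega
    have hreps := reps_spec length (L : Int) hlen (by omega)
    set reps := -(PySem.Int.floordiv (-length) (L : Int)) with hrepsdef
    have hrtn : (reps.toNat : Int) = reps := by omega
    have hcastlen : (length.toNat : Int) = length := by omega
    have hrN : length.toNat ≤ reps.toNat * L := by
      have hcast : ((reps.toNat * L : Nat) : Int) = reps * (L : Int) := by
        push_cast [hrtn]; ring
      have hle : (length.toNat : Int) ≤ ((reps.toNat * L : Nat) : Int) := by
        rw [hcast, hcastlen]
        exact hreps.2
      exact_mod_cast hle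
    rw [PySem.List.slice_zero_start, PySem.List.slice_to _ (by omega)]
    congr 1
    rw [show PySem.List.pyRepeat (adBchars mn mx) reps
        = (List.replicate reps.toNat (adBchars mn mx)).flatten from rfl]
    exact take_stream_eq length mn mx hlen hlt reps.toNat (by omega) hrN
  · -- capped: top = minimum + length < maximum; block is ascending-only and already long enough
    have hmin : min mx (mn + length) = mn + length := min_eq_right (by omega)
    rw [hmin, if_neg (by omega)]
    set block := ((PySem.List.pyRange mn (mn + length + 1) 1).map PySem.Int.toChars).flatten with hblock
    have hblen : length.toNat + 1 ≤ block.length := by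
      have h1 := flatten_map_len_ge (PySem.List.pyRange mn (mn + length + 1) 1)
      have h2 : (PySem.List.pyRange mn (mn + length + 1) 1).length = length.toNat + 1 := by
        rw [PySem.List.length_pyRange_one]
        omega
      rw [h2] at h1
      rw [hblock]
      omega
    have hreps := reps_spec length (block.length : Int) hlen (by omega)
    set reps := -(PySem.Int.floordiv (-length) (block.length : Int)) with hrepsdef
    rw [PySem.List.slice_zero_start, PySem.List.slice_to _ (by omega)]
    congr 1
    rw [show PySem.List.pyRepeat block reps
        = (List.replicate reps.toNat block).flatten from rfl]
    rw [take_flat_replicate block length.toNat 1 reps.toNat (by omega) (by omega)]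
    simp only [List.replicate_succ, List.replicate_zero, List.flatten_cons, List.flatten_nil,
      List.append_nil]
    -- left side: the first length.toNat steps are all ascending
    have hasc := (adGen_asc mn mx hlt length.toNat mn (le_refl mn) (by omega)).1
    rw [hasc]
    have hcons : PySem.List.pyRange mn (mn + length + 1) 1
        = mn :: PySem.List.pyRange (mn+1) (mn+1+(length.toNat : Int)) 1 := by
      have h1 : mn + length + 1 = mn + 1 + (length.toNat : Int) := by omega
      rw [h1]
      exact PySem.List.pyRange_one_cons (by omega)
    rw [hblock, hcons]
    simp only [List.map_cons, List.flatten_cons]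

-- ===== VERDICT =====
theorem ascend_descend_spec : Claim_unchanged_ascend_descend := by
  unfold Claim_unchanged_ascend_descend
  intro length mn mx _
  unfold Spec_ascend_descend
  intro hD
  unfold D_ascend_descend at hD
  push_neg at hD
  by_cases h1 : mx < mn
  · unfold ascend_descend ascend_descend_alt
    rw [if_pos (Or.inl h1), if_pos (Or.inl h1)]
  · by_cases h2 : length = 0
    · unfold ascend_descend ascend_descend_alt
      rw [if_pos (Or.inr h2), if_pos (Or.inr (by omega))]
    · by_cases h3 : 0 < length
      · by_cases h4 : mx = mn
        · unfold ascend_descend ascend_descend_alt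
          rw [if_neg (show ¬ (mx < mn ∨ length = 0) from by omega),
              if_neg (show ¬ (mx < mn ∨ length ≤ 0) from by omega), if_pos h4, if_pos h4]
        · exact main_eq length mn mx h3 (by omega)
      · -- length < 0: B is "", and so is A outside D_
        have hneg : length < 0 := by omega
        have hB : ascend_descend_alt length mn mx = "" := by
          unfold ascend_descend_alt
          rw [if_pos (Or.inr (by omega))]
        rw [hB]
        by_cases h4 : mx = mn
        · unfold ascend_descend
          rw [if_neg (show ¬ (mx < mn ∨ length = 0) from by omega), if_pos h4]
          rw [show PySem.List.pyRepeat (PySem.Int.toChars mn) length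
              = (List.replicate length.toNat (PySem.Int.toChars mn)).flatten from rfl]
          rw [show length.toNat = 0 from by omega]
          rw [PySem.List.slice_zero_start]
          rw [show length = -(((-length).toNat : Nat) : Int) from by omega]
          rw [PySem.List.slice_to_neg_natCast _ _ (by omega)]
          simp only [List.replicate, List.flatten_nil, List.take_nil]
        · have hlt : mn < mx := by omega
          have hDlen : length + ((PySem.Int.toChars mn).length : Int) ≤ 0 := by
            have := hD hneg hlt
            omega
          unfold ascend_descend
          rw [if_neg (show ¬ (mx < mn ∨ length = 0) from by omega), if_neg h4]
          rw [show length.toNat = 0 from by omega]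
          rw [show ascendLoop length mn mx 0 (PySem.Int.toChars mn) mn 1
              = PySem.Int.toChars mn from rfl]
          rw [PySem.List.slice_zero_start]
          rw [show length = -(((-length).toNat : Nat) : Int) from by omega]
          rw [PySem.List.slice_to_neg_natCast _ _ (by omega)]
          rw [show (PySem.Int.toChars mn).length - (-length).toNat = 0 from by omega]
          simp

theorem ascend_descend_changed : Claim_changed_ascend_descend := by
  unfold Claim_changed_ascend_descend
  decide

theorem ascend_descend_tight : Claim_exact_ascend_descend := by
  unfold Claim_exact_ascend_descend
  intro length mn mx _ hD
  unfold D_ascend_descend at hD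
  obtain ⟨hneg, hlt, hlen⟩ := hD
  have hB : ascend_descend_alt length mn mx = "" := by
    unfold ascend_descend_alt
    rw [if_pos (Or.inr (by omega))]
  rw [hB]
  unfold ascend_descend
  rw [if_neg (show ¬ (mx < mn ∨ length = 0) from by omega), if_neg (show ¬ (mx = mn) from by omega)]
  rw [show length.toNat = 0 from by omega]
  rw [show ascendLoop length mn mx 0 (PySem.Int.toChars mn) mn 1
      = PySem.Int.toChars mn from rfl]
  rw [PySem.List.slice_zero_start]
  rw [show length = -(((-length).toNat : Nat) : Int) from by omega]
  rw [PySem.List.slice_to_neg_natCast _ _ (by omega)]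
  intro hc
  have hlist := congrArg String.toList hc
  simp only [String.toList_ofList] at hlist
  have hlen2 : ((PySem.Int.toChars mn).take ((PySem.Int.toChars mn).length - (-length).toNat)).length = 0 := by
    rw [hlist]; simp
  rw [List.length_take] at hlen2
  have hpos := toChars_len_pos mn
  omega
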